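-- pv_equiv track=rewrite | github.com/nejcarh/thesis_nanobody | rotamers/script_rotamers.py | assemble_residues
-- ===== SOURCE A (Python) =====
-- common_atoms = ["N", "CA", "C", "O", "OXT"]
--
-- def assemble_residues(data, list_residues):
--     res_blueprints = []
--
--     for current_name in list_residues:
--         current = []
--
--         for i in common_atoms:
--             for item in data:
--                 if item[0] == i:
--                     current.append(item)
--
--         for item in data:
--             if item[1] == current_name:
--                 current.append(item)
--         res_blueprints.append(current)
--
--     return res_blueprints
-- ===== SOURCE B (Python) =====
-- common_atoms = ["N", "CA", "C", "O", "OXT"]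
--
-- def assemble_residues(data, list_residues):
--     if not list_residues:
--         return []
--     # scan data once per common atom name (5 scans total, not per residue)
--     common = [item for atom in common_atoms for item in data if item[0] == atom]
--     # index data by residue name once
--     by_res = {}
--     for item in data:
--         by_res.setdefault(item[1], []).append(item)
--     return [common + by_res.get(name, []) for name in list_residues]
-- ===== Notes on version B (the rewrite author's own statement) =====
-- stated objective: alternative
-- what changed: Instead of rescanning all of data for the common atoms and for the matching residue inside every residue-name iteration, B computes the common-atom list once and builds a dict indexing data rows by residue name once, then assembles each output row by one concatenation and one dict lookup (the output itself dominates the cost, so no measured speed-up).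
import Mathlib
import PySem

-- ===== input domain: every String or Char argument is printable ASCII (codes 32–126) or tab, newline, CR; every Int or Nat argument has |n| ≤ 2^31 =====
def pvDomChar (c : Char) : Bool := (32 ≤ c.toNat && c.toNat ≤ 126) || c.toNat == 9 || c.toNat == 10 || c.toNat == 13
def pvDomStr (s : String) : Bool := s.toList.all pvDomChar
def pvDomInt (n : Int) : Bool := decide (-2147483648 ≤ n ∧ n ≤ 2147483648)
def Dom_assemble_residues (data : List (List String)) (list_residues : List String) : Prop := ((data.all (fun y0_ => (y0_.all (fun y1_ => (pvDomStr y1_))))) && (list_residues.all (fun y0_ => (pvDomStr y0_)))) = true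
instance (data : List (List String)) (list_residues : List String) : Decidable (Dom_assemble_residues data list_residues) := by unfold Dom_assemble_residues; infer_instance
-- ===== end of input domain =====

-- B precomputes the common-atom list once and indexes data rows by residue name in a dict,
-- replacing A's per-residue rescans of data (objective: alternative single-pass indexing).

-- ===== PORT A =====
def pvCommonAtoms : List String := ["N", "CA", "C", "O", "OXT"]

-- item[0] / item[1]; total form of pyGet?: exact wherever Python does not raise (Pre_ excludes the raise)
def pvAtom (it : List String) : String := (PySem.List.pyGet? it 0).getD ""
def pvRes1 (it : List String) : String := (PySem.List.pyGet? it 1).getD ""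

def assemble_residues (data : List (List String)) (list_residues : List String) : List (List (List String)) :=
  list_residues.foldl (fun res_blueprints current_name =>
    let current : List (List String) := []
    let current := pvCommonAtoms.foldl (fun cur i =>
      data.foldl (fun c item => if pvAtom item == i then c ++ [item] else c) cur) current
    let current := data.foldl (fun c item => if pvRes1 item == current_name then c ++ [item] else c) current
    res_blueprints ++ [current]) []

-- ===== PORT B =====
def assemble_residues_alt (data : List (List String)) (list_residues : List String) : List (List (List String)) :=
  if list_residues.isEmpty then []
  else
    let common := pvCommonAtoms.flatMap (fun atom => data.filter (fun item => pvAtom item == atom))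
    let by_res := data.foldl (fun d item => d.modify (pvRes1 item) [] (· ++ [item])) PySem.Dict.empty
    list_residues.map (fun name => common ++ by_res.getD name [])

-- ===== PRECONDITION & SPEC =====
-- Pre_ excludes exactly the inputs where Python A raises IndexError: a nonempty list_residues
-- together with some data row of length < 2 (A indexes item[0] and item[1] for every residue name).
def Pre_assemble_residues (data : List (List String)) (list_residues : List String) : Prop :=
  list_residues = [] ∨ ∀ it ∈ data, 2 ≤ it.length
instance (data : List (List String)) (list_residues : List String) : Decidable (Pre_assemble_residues data list_residues) := by unfold Pre_assemble_residues; infer_instance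

def pvWitness_assemble_residues : List (List String) × List String :=
  ([["N", "ALA"], ["CB", "GLY"]], ["GLY", "ALA"])

def Spec_assemble_residues (data : List (List String)) (list_residues : List String) (out : List (List (List String))) : Prop := out = assemble_residues_alt data list_residues
instance (data : List (List String)) (list_residues : List String) (out : List (List (List String))) : Decidable (Spec_assemble_residues data list_residues out) := by unfold Spec_assemble_residues; infer_instance

-- ===== CLAIM (what is proved, stated in full; the proofs are below) =====
def Claim_equal_assemble_residues : Prop := ∀ (data : List (List String)) (list_residues : List String), Dom_assemble_residues data list_residues → Pre_assemble_residues data list_residues → Spec_assemble_residues data list_residues (assemble_residues data list_residues)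

-- ===== LEMMAS AND PROOFS =====

-- B's grouping dict looked up at `name` is exactly A's per-residue filter of data.
theorem pvGroup_getD (data : List (List String)) (name : String) :
    (data.foldl (fun d item => d.modify (pvRes1 item) [] (· ++ [item])) PySem.Dict.empty).getD name []
      = data.filter (fun item => pvRes1 item == name) := by
  have h := PySem.Dict.getD_foldl_modify_append
    (l := data.map (fun item => (pvRes1 item, item)))
    (d := (PySem.Dict.empty : PySem.Dict String (List (List String)))) (c := name)
  rw [List.foldl_map] at h
  simp only [h, PySem.Dict.getD_empty, List.nil_append, List.filter_map, List.map_map]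
  simp [Function.comp_def]

theorem assemble_residues_spec : Claim_equal_assemble_residues := by
  intro data list_residues _hdom _hpre
  unfold Spec_assemble_residues assemble_residues assemble_residues_alt
  cases list_residues with
  | nil => simp
  | cons hd tl =>
    simp only [List.isEmpty_cons, if_neg (by simp : ¬ false = true)]
    simp only [PySem.List.foldl_append_if_eq_filter, PySem.List.foldl_append_eq_flatMap,
      List.nil_append, pvGroup_getD]
    exact Eq.symm List.map_eq_flatMap

-- ===== VERDICT (by name: the statement is the Claim_ definition above) =====
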